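-- pv_equiv track=rewrite | github.com/JEntler/Sixt | tools.py | convert_dates
-- ===== SOURCE A (Python) =====
-- def convert_dates(dates):
-- 	months = [month[1] for month in dates]
-- 	days = [day[2] for day in dates]
-- 	years = [year[0] for year in dates]
-- 	hours = [hour[3] for hour in dates]
-- 	minutes = [minute[4] for minute in dates]
-- 	seconds = [second[5] for second in dates]
-- 	short_date = list(map(lambda a, b, c: str(a) + "/" + str(b) + "/" + str(c), months, days, years))
-- 	time = list(map(lambda a, b, c: str(a) + ":" + str(b) + ":" + str(c), hours, minutes, seconds))
-- 	return short_date, time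
-- ===== SOURCE B (Python) =====
-- def convert_dates(dates):
-- 	short_date = []
-- 	time = []
-- 	for date in dates:
-- 		short_date.append(str(date[1]) + "/" + str(date[2]) + "/" + str(date[0]))
-- 		time.append(str(date[3]) + ":" + str(date[4]) + ":" + str(date[5]))
-- 	return short_date, time
-- ===== Notes on version B (the rewrite author's own statement) =====
-- stated objective: simpler
-- what changed: Collapses A's six column-extraction comprehensions plus two three-way map passes into one row-wise loop that appends directly to the two result lists.
import Mathlib
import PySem

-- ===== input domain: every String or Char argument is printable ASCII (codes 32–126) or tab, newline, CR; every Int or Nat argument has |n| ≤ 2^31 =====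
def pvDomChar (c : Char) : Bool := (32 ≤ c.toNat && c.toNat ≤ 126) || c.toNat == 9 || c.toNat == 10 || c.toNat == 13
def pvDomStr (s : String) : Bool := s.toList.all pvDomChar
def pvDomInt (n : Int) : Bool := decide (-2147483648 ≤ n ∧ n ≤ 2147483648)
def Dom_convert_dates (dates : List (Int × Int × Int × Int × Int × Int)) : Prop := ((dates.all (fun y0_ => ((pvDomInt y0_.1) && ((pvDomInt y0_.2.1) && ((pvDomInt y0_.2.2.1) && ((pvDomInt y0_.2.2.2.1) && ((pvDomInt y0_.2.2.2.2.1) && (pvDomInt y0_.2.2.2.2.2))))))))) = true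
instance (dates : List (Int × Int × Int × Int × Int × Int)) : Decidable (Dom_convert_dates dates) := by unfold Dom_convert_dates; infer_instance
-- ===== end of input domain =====

-- B collapses A's six column comprehensions plus two three-way map passes into one row-wise loop appending to the two result lists (simpler decomposition, same O(n) cost).


-- ===== PORT A =====
-- Python's map over three equal-length lists (they are always equal length here)
def pvMap3 (f : Int → Int → Int → String) : List Int → List Int → List Int → List String
  | a :: as, b :: bs, c :: cs => f a b c :: pvMap3 f as bs cs
  | _, _, _ => []

def convert_dates (dates : List (Int × Int × Int × Int × Int × Int)) : List String × List String :=
  let months := dates.map (fun month => month.2.1)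
  let days := dates.map (fun day => day.2.2.1)
  let years := dates.map (fun year => year.1)
  let hours := dates.map (fun hour => hour.2.2.2.1)
  let minutes := dates.map (fun minute => minute.2.2.2.2.1)
  let seconds := dates.map (fun second => second.2.2.2.2.2)
  let short_date := pvMap3 (fun a b c => PySem.Int.toStr a ++ "/" ++ PySem.Int.toStr b ++ "/" ++ PySem.Int.toStr c) months days years
  let time := pvMap3 (fun a b c => PySem.Int.toStr a ++ ":" ++ PySem.Int.toStr b ++ ":" ++ PySem.Int.toStr c) hours minutes seconds
  (short_date, time)

-- ===== PORT B =====
-- one row-wise loop appending to the two accumulators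
def convert_dates_alt (dates : List (Int × Int × Int × Int × Int × Int)) : List String × List String :=
  dates.foldl
    (fun acc date =>
      (acc.1 ++ [PySem.Int.toStr date.2.1 ++ "/" ++ PySem.Int.toStr date.2.2.1 ++ "/" ++ PySem.Int.toStr date.1],
       acc.2 ++ [PySem.Int.toStr date.2.2.2.1 ++ ":" ++ PySem.Int.toStr date.2.2.2.2.1 ++ ":" ++ PySem.Int.toStr date.2.2.2.2.2]))
    ([], [])

-- ===== PRECONDITION & SPEC =====
def Spec_convert_dates (dates : List (Int × Int × Int × Int × Int × Int)) (out : List String × List String) : Prop := out = convert_dates_alt dates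
instance (dates : List (Int × Int × Int × Int × Int × Int)) (out : List String × List String) : Decidable (Spec_convert_dates dates out) := by unfold Spec_convert_dates; infer_instance

-- ===== CLAIM (what is proved, stated in full; the proofs are below) =====
def Claim_equal_convert_dates : Prop := ∀ (dates : List (Int × Int × Int × Int × Int × Int)), Dom_convert_dates dates → Spec_convert_dates dates (convert_dates dates)

-- ===== LEMMAS AND PROOFS =====
theorem alt_foldl_acc (dates : List (Int × Int × Int × Int × Int × Int))
    (s t : List String) :
    dates.foldl
      (fun acc date =>
        (acc.1 ++ [PySem.Int.toStr date.2.1 ++ "/" ++ PySem.Int.toStr date.2.2.1 ++ "/" ++ PySem.Int.toStr date.1],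
         acc.2 ++ [PySem.Int.toStr date.2.2.2.1 ++ ":" ++ PySem.Int.toStr date.2.2.2.2.1 ++ ":" ++ PySem.Int.toStr date.2.2.2.2.2]))
      (s, t)
    = (s ++ dates.map (fun d => PySem.Int.toStr d.2.1 ++ "/" ++ PySem.Int.toStr d.2.2.1 ++ "/" ++ PySem.Int.toStr d.1),
       t ++ dates.map (fun d => PySem.Int.toStr d.2.2.2.1 ++ ":" ++ PySem.Int.toStr d.2.2.2.2.1 ++ ":" ++ PySem.Int.toStr d.2.2.2.2.2)) := by
  induction dates generalizing s t with
  | nil => simp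
  | cons d ds ih => simp [List.foldl, ih]

theorem pvMap3_map (f : Int → Int → Int → String)
    (g1 g2 g3 : (Int × Int × Int × Int × Int × Int) → Int)
    (dates : List (Int × Int × Int × Int × Int × Int)) :
    pvMap3 f (dates.map g1) (dates.map g2) (dates.map g3)
      = dates.map (fun d => f (g1 d) (g2 d) (g3 d)) := by
  induction dates with
  | nil => rfl
  | cons d ds ih => simp [pvMap3, ih]

-- ===== VERDICT (by name: the statement is the Claim_ definition above) =====
theorem convert_dates_spec : Claim_equal_convert_dates := by
  intro dates _
  unfold Spec_convert_dates convert_dates convert_dates_alt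
  rw [alt_foldl_acc]
  simp only []
  rw [pvMap3_map, pvMap3_map]
  simp
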